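-- pv_equiv track=rewrite | github.com/vinay-yadav/Introduction_To_DSA | 3.  Bitwise Manipulation/12. Find nth Magic Number.py | solve
-- ===== SOURCE A (Python) =====
-- def solve(A):
--     i = 1
--     answer = 0
--
--     while A > 0:
--         if A & 1 != 0:
--             answer += 5 ** i
--
--         A = A >> 1
--
--         i += 1
--
--     return answer
-- ===== SOURCE B (Python) =====
-- def solve(A):
--     if A <= 0:
--         return 0
--     return 5 * int(bin(A)[2:], 5)
-- ===== Notes on version B (the rewrite author's own statement) =====
-- stated objective: idiomatic
-- what changed: Replaced the bit-by-bit loop accumulating powers of 5 by a loop-free expression that reads A's binary string as a base-5 number and multiplies by 5.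
import Mathlib
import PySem

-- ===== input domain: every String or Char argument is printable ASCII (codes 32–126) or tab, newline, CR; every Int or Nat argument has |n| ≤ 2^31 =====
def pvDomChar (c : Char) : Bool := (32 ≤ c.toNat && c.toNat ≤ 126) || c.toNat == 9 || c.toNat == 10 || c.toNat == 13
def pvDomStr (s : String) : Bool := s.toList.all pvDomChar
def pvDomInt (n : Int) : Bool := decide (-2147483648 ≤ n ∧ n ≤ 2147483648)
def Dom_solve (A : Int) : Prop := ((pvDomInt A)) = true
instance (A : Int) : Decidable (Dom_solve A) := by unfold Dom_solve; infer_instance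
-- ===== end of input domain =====

-- B replaces A's bit-by-bit loop over powers of 5 by reading A's binary digit string
-- as a base-5 number and multiplying once by 5 (objective: idiomatic, loop-free in Python).

-- ===== PORT A =====
-- while A > 0: if A & 1 != 0: answer += 5**i; A >>= 1; i += 1
-- A & 1 is PySem.Int.band A 1 (Python-exact); A >> 1 is Lean's A >>> 1 (Python-exact per PySem).
def solveLoopA (A : Int) (i : Nat) (answer : Int) : Int :=
  if h : A > 0 then
    solveLoopA (A >>> (1 : Nat)) (i + 1)
      (if PySem.Int.band A 1 ≠ 0 then answer + 5 ^ i else answer)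
  else answer
termination_by A.toNat
decreasing_by
  have : A >>> (1 : Nat) = A / 2 := by
    simp [Int.shiftRight_eq_div_pow]
  omega

def solve (A : Int) : Int := solveLoopA A 1 0

-- ===== PORT B =====
-- bin(A)[2:] for A > 0: the binary digits of A, most significant first (hand-ported, exact for A > 0)
def binDigits (n : Nat) : List Nat :=
  if n = 0 then [] else binDigits (n / 2) ++ [n % 2]
termination_by n
decreasing_by omega

-- int(s, 5): Horner parse of the digit list in base 5 (exact: digits are 0/1)
def solve_alt (A : Int) : Int :=
  if A ≤ 0 then 0
  else 5 * ((binDigits A.toNat).foldl (fun (acc : Int) (d : Nat) => acc * 5 + (d : Int)) 0)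

-- ===== PRECONDITION & SPEC =====
def Spec_solve (A : Int) (out : Int) : Prop := out = solve_alt A
instance (A : Int) (out : Int) : Decidable (Spec_solve A out) := by unfold Spec_solve; infer_instance

-- ===== CLAIM (what is proved, stated in full; the proofs are below) =====
def Claim_equal_solve : Prop := ∀ (A : Int), Dom_solve A → Spec_solve A (solve A)

-- ===== LEMMAS AND PROOFS =====

-- the common value: base-5 number whose digits are n's binary digits
def fN (n : Nat) : Int :=
  if n = 0 then 0 else 5 * fN (n / 2) + (n % 2 : Nat)
termination_by n
decreasing_by omega

theorem solveLoopA_eq (A : Int) (i : Nat) (answer : Int) :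
    solveLoopA A i answer = answer + 5 ^ i * fN A.toNat := by
  fun_induction solveLoopA with
  | case1 A i answer h ih =>
    have hs : A >>> (1 : Nat) = A / 2 := by simp [Int.shiftRight_eq_div_pow]
    have ht : (A >>> (1 : Nat)).toNat = A.toNat / 2 := by rw [hs]; omega
    have hb : PySem.Int.band A 1 = A % 2 := by
      rw [PySem.Int.band_one]
      simp [PySem.Int.mod, Int.fmod_eq_emod]
    have hf : fN A.toNat = 5 * fN (A.toNat / 2) + (A.toNat % 2 : Nat) := by
      rw [fN]; simp [show ¬ (A.toNat = 0) by omega]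
    simp only [ne_eq, dite_eq_ite] at ih
    rw [ih, ht, hf]
    split_ifs with hm <;> rw [hb] at hm
    · have hm0 : ((A.toNat % 2 : Nat) : Int) = 0 := by omega
      rw [hm0]; ring
    · have hm1 : ((A.toNat % 2 : Nat) : Int) = 1 := by omega
      rw [hm1]; ring

  | case2 A i answer h =>
    have : A.toNat = 0 := by omega
    rw [this, fN]; simp

theorem foldl_binDigits (n : Nat) :
    (binDigits n).foldl (fun (acc : Int) (d : Nat) => acc * 5 + (d : Int)) 0 = fN n := by
  fun_induction binDigits with
  | case1 => rw [fN]; simp_all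
  | case2 n hn ih =>
    rw [List.foldl_append, ih]
    have hfn : fN n = 5 * fN (n / 2) + ((n % 2 : Nat) : Int) := by rw [fN]; simp [hn]
    rw [hfn]; simp [List.foldl]; ring

-- ===== VERDICT (by name: the statement is the Claim_ definition above) =====
theorem solve_spec : Claim_equal_solve := by
  intro A _
  unfold Spec_solve solve solve_alt
  rw [solveLoopA_eq, foldl_binDigits]
  by_cases h : A ≤ 0
  · have : A.toNat = 0 := by omega
    simp [h, this, fN]
  · simp only [if_neg h]
    ring
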